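-- pv_equiv track=rewrite | github.com/hjlynch2/assignment2 | part2/breakthrough_game.py | find_dist_to_end
-- ===== SOURCE A (Python) =====
-- def find_dist_to_end(color, board):
--     dist = 10000 #initialize to large num
--     if color == 'b':
--         end_goal = 7
--     else:
--         end_goal = 0
--     dist_sum = 0
--     for i in range(0, len(board)):
--         for j in range(0, len(board[0])):
--             if(board[i][j] == color):
--                 new_dist = abs(i - end_goal)
--                 dist = min(dist, new_dist)
--     return dist
-- ===== SOURCE B (Python) =====
-- def find_dist_to_end(color, board):
--     # Visit rows nearest the goal edge first; the first row containing the
--     # color gives the minimal distance, so we can return immediately.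
--     end_goal = 7 if color == 'b' else 0
--     for i in sorted(range(len(board)), key=lambda i: abs(i - end_goal)):
--         if color in board[i]:
--             return abs(i - end_goal)
--     return 10000
-- ===== Notes on version B (the rewrite author's own statement) =====
-- stated objective: alternative
-- what changed: Replaces the exhaustive per-cell min-reduction with a proximity-ordered row scan (row indices sorted by distance to the goal edge) that returns at the first row containing the color; Pre_ excludes ragged boards (malformed game boards, on which A raises IndexError or silently ignores cells beyond the first row's width) and boards whose color sits only more than 10000 rows from the goal edge (there A's return 10000 collides with its own not-found sentinel, and either value is defensible).
-- outside the precondition, e.g. on find_dist_to_end('w', [['b'], ['b', 'w']]): A returns 10000, B returns 1; on find_dist_to_end('w', [[], ['w']]): A returns 10000, B returns 1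
import Mathlib
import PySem

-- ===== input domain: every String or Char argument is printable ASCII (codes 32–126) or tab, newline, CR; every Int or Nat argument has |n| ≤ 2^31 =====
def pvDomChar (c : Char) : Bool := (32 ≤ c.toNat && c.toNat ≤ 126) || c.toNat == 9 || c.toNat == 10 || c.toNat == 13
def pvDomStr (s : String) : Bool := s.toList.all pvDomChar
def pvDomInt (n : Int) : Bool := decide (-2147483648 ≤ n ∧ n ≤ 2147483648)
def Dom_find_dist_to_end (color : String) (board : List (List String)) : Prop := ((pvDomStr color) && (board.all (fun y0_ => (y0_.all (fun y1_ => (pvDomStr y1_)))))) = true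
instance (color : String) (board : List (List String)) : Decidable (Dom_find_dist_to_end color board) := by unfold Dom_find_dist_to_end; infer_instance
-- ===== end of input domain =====

-- B replaces A's exhaustive per-cell min-reduction by a proximity-ordered row scan
-- that returns at the first row containing the color (objective: alternative).


-- ===== PORT A =====
def find_dist_to_end (color : String) (board : List (List String)) : Int :=
  let end_goal : Int := if color == "b" then 7 else 0
  (PySem.List.pyRange 0 board.length 1).foldl (fun dist i =>
    (PySem.List.pyRange 0 (board.headD []).length 1).foldl (fun dist j =>
      if ((PySem.List.pyGet? board i).bind (fun row => PySem.List.pyGet? row j)) == some color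
      then min dist |i - end_goal| else dist) dist) 10000

-- ===== PORT B =====
-- the for-loop over the proximity-sorted row order, with early return
def altFind (color : String) (board : List (List String)) (end_goal : Int) : List Int → Int
  | [] => 10000
  | i :: rest =>
      if (PySem.List.pyGetD board i []).contains color
      then |i - end_goal|
      else altFind color board end_goal rest

def find_dist_to_end_alt (color : String) (board : List (List String)) : Int :=
  let end_goal : Int := if color == "b" then 7 else 0
  altFind color board end_goal
    (PySem.List.sorted (PySem.List.pyRange 0 board.length 1) (fun i => |i - end_goal|) false)

-- ===== PRECONDITION & SPEC =====
-- Pre_ excludes (a) ragged boards — malformed game boards, on which A raises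
-- IndexError (a row shorter than the first) or silently ignores the cells of a row
-- beyond the first row's width — and (b) boards where the color occurs only at rows
-- more than 10000 rows from the goal edge, where A's return value 10000 collides
-- with its own 'not found' sentinel and either that or the true distance is defensible.
def Pre_find_dist_to_end (color : String) (board : List (List String)) : Prop :=
  (∀ row ∈ board, row.length = (board.headD []).length) ∧
  (∀ p ∈ board.zipIdx, p.1.contains color = true →
    |(p.2 : Int) - (if color == "b" then 7 else 0)| ≤ 10000)
instance (color : String) (board : List (List String)) : Decidable (Pre_find_dist_to_end color board) := by unfold Pre_find_dist_to_end; infer_instance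

def pvWitness_find_dist_to_end : String × List (List String) := ("b", [["b", "w"], ["w", "w"]])

def Spec_find_dist_to_end (color : String) (board : List (List String)) (out : Int) : Prop := out = find_dist_to_end_alt color board
instance (color : String) (board : List (List String)) (out : Int) : Decidable (Spec_find_dist_to_end color board out) := by unfold Spec_find_dist_to_end; infer_instance

-- ===== CLAIM (what is proved, stated in full; the proofs are below) =====
def Claim_equal_find_dist_to_end : Prop := ∀ (color : String) (board : List (List String)), Dom_find_dist_to_end color board → Pre_find_dist_to_end color board → Spec_find_dist_to_end color board (find_dist_to_end color board)

-- ===== LEMMAS AND PROOFS =====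
-- a fold that conditionally min-folds a constant
theorem fold_if_const (l : List Int) (p : Int → Bool) (c acc : Int) :
    l.foldl (fun d x => if p x then min d c else d) acc
      = if l.any p then min acc c else acc := by
  induction l generalizing acc with
  | nil => simp
  | cons x t ih =>
    simp only [List.foldl_cons, List.any_cons]
    by_cases hx : p x = true
    · simp [hx, ih]
    · simp [hx, ih]

-- a conditional min-fold whose matching keys are all ≥ acc leaves acc unchanged
theorem fold_min_ge (l : List Int) (p : Int → Bool) (k : Int → Int) (acc : Int)
    (h : ∀ x ∈ l, p x = true → acc ≤ k x) :
    l.foldl (fun d x => if p x then min d (k x) else d) acc = acc := by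
  induction l with
  | nil => rfl
  | cons x t ih =>
    simp only [List.foldl_cons]
    by_cases hp : p x = true
    · have hx : min acc (k x) = acc := min_eq_left (h x (by simp) hp)
      simp only [hp, if_true, hx]
      exact ih (fun y hy => h y (by simp [hy]))
    · simp only [if_neg hp]
      exact ih (fun y hy => h y (by simp [hy]))

-- a conditional min-fold with no match leaves acc unchanged
theorem fold_no_match (l : List Int) (p : Int → Bool) (k : Int → Int) (acc : Int)
    (h : ∀ x ∈ l, ¬ p x = true) :
    l.foldl (fun d x => if p x then min d (k x) else d) acc = acc := by
  induction l with
  | nil => rfl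
  | cons x t ih =>
    simp only [List.foldl_cons, if_neg (h x (by simp))]
    exact ih (fun y hy => h y (by simp [hy]))

-- the early-return scan returns 10000 when no listed row contains the color
theorem altFind_not_found (color : String) (board : List (List String)) (g : Int)
    (l : List Int) (h : ∀ i ∈ l, ¬ (PySem.List.pyGetD board i []).contains color = true) :
    altFind color board g l = 10000 := by
  induction l with
  | nil => rfl
  | cons i t ih =>
    simp only [altFind, if_neg (h i (by simp))]
    exact ih (fun j hj => h j (by simp [hj]))

-- on a key-sorted list with a match of key ≤ 10000, the scan equals the min-fold
theorem altFind_eq_fold (color : String) (board : List (List String)) (g : Int)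
    (l : List Int) (hs : l.Pairwise (fun a b => |a - g| ≤ |b - g|))
    (h : ∃ j ∈ l, (PySem.List.pyGetD board j []).contains color = true ∧ |j - g| ≤ 10000) :
    altFind color board g l
      = l.foldl (fun d i =>
          if (PySem.List.pyGetD board i []).contains color
          then min d |i - g| else d) 10000 := by
  induction l with
  | nil => simp at h
  | cons i t ih =>
    rcases List.pairwise_cons.mp hs with ⟨hhead, htail⟩
    simp only [altFind, List.foldl_cons]
    by_cases hp : (PySem.List.pyGetD board i []).contains color = true
    · simp only [hp, if_true]
      have hle : |i - g| ≤ 10000 := by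
        obtain ⟨j, hj, _, hj10⟩ := h
        rcases List.mem_cons.mp hj with rfl | hjt
        · exact hj10
        · exact le_trans (hhead j hjt) hj10
      rw [min_eq_right hle, fold_min_ge _ _ _ _ (fun x hx _ => hhead x hx)]
    · simp only [if_neg hp]
      obtain ⟨j, hj, hjc, hj10⟩ := h
      rcases List.mem_cons.mp hj with rfl | hjt
      · exact absurd hjc hp
      · exact ih htail ⟨j, hjt, hjc, hj10⟩

-- any over the column range equals membership in the truncated row
theorem any_eq_contains (color : String) (row : List String) (w : Nat) (hw : w ≤ row.length) :
    ((PySem.List.pyRange 0 (w : Int) 1).any fun j =>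
        PySem.List.pyGet? row j == some color)
      = (row.take w).contains color := by
  rw [Bool.eq_iff_iff]
  simp only [List.any_eq_true, PySem.List.mem_pyRange_one]
  constructor
  · rintro ⟨j, ⟨hj0, hjw⟩, hp⟩
    have hjl : j.toNat < row.length := by omega
    rw [PySem.List.pyGet?_eq_some_getElem row hj0 (by omega)] at hp
    have : row[j.toNat] = color := by simpa using hp
    simp only [List.contains_iff_mem, List.mem_take_iff_getElem]
    exact ⟨j.toNat, by omega, this⟩
  · intro hc
    simp only [List.contains_iff_mem, List.mem_take_iff_getElem] at hc
    obtain ⟨m, hm, hme⟩ := hc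
    refine ⟨(m : Int), ⟨by omega, by omega⟩, ?_⟩
    rw [PySem.List.pyGet?_eq_some_getElem row (by omega) (by omega)]
    simp only [Int.toNat_natCast]
    simp [hme]

-- on a rectangular board, A's nested fold equals the row-level min-fold
theorem portA_eq_rowfold (color : String) (board : List (List String)) (g : Int)
    (hrect : ∀ row ∈ board, row.length = (board.headD []).length) :
    (PySem.List.pyRange 0 board.length 1).foldl (fun dist i =>
        (PySem.List.pyRange 0 (board.headD []).length 1).foldl (fun dist j =>
          if ((PySem.List.pyGet? board i).bind (fun row => PySem.List.pyGet? row j)) == some color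
          then min dist |i - g| else dist) dist) 10000
      = (PySem.List.pyRange 0 board.length 1).foldl (fun d i =>
          if (PySem.List.pyGetD board i []).contains color
          then min d |i - g| else d) 10000 := by
  apply PySem.List.foldl_congr_mem
  intro d i hi
  rw [PySem.List.mem_pyRange_one] at hi
  have hrow : PySem.List.pyGet? board i = some (PySem.List.pyGetD board i []) := by
    rw [PySem.List.pyGet?_eq_some_getElem board hi.1 hi.2]
    rw [PySem.List.pyGetD_eq_getElem board [] hi.1 hi.2]
  have hwl : (PySem.List.pyGetD board i []).length = (board.headD []).length :=
    hrect _ (PySem.List.mem_of_pyGet?_eq_some board hrow)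
  rw [hrow]
  simp only [Option.bind_some]
  have h1 := fold_if_const (PySem.List.pyRange 0 ((board.headD []).length : Int) 1)
    (fun j => PySem.List.pyGet? (PySem.List.pyGetD board i []) j == some color) |i - g| d
  rw [any_eq_contains color _ (board.headD []).length (le_of_eq hwl.symm)] at h1
  have h2 : ((PySem.List.pyGetD board i []).take (board.headD []).length)
      = PySem.List.pyGetD board i [] := by
    rw [← hwl]; exact List.take_length
  rw [h2] at h1
  exact h1

-- membership bridge between the sorted index list and rows of the board
theorem mem_sortedRange_iff (board : List (List String)) (g : Int) (i : Int) :
    i ∈ PySem.List.sorted (PySem.List.pyRange 0 board.length 1) (fun i => |i - g|) false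
      ↔ 0 ≤ i ∧ i < board.length := by
  rw [PySem.List.mem_sorted, PySem.List.mem_pyRange_one]

theorem zipIdx_bridge (board : List (List String)) (i : Int)
    (h0 : 0 ≤ i) (hl : i < board.length) :
    (PySem.List.pyGetD board i [], i.toNat) ∈ board.zipIdx := by
  rw [List.mk_mem_zipIdx_iff_getElem?]
  rw [PySem.List.pyGetD_eq_getElem board [] h0 hl]
  exact List.getElem?_eq_getElem (by omega)

theorem find_dist_to_end_spec : Claim_equal_find_dist_to_end := by
  intro color board _hdom hpre
  obtain ⟨hrect, hnear⟩ := hpre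
  unfold Spec_find_dist_to_end
  unfold find_dist_to_end find_dist_to_end_alt
  set g : Int := if color == "b" then 7 else 0 with hg
  rw [portA_eq_rowfold color board g hrect]
  by_cases hex : ∃ j ∈ PySem.List.sorted (PySem.List.pyRange 0 board.length 1)
      (fun i => |i - g|) false, (PySem.List.pyGetD board j []).contains color = true
  · -- some listed row contains the color; Pre_ bounds its distance by 10000
    obtain ⟨j, hj, hjc⟩ := hex
    have hjmem := hj
    rw [mem_sortedRange_iff] at hj
    have hj10 : |j - g| ≤ 10000 := by
      have := hnear _ (zipIdx_bridge board j hj.1 hj.2) hjc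
      rw [Int.toNat_of_nonneg hj.1] at this
      exact this
    rw [altFind_eq_fold color board g _
      (PySem.List.sorted_pairwise (PySem.List.pyRange 0 board.length 1) (fun i => |i - g|))
      ⟨j, hjmem, hjc, hj10⟩]
    refine ((PySem.List.sorted_perm (PySem.List.pyRange 0 board.length 1)
        (fun i => |i - g|) false).foldl_eq' ?_ 10000).symm
    intro x _ y _ z
    dsimp only
    split_ifs <;> first | rfl | rw [min_right_comm]
  · -- no row contains the color: both sides are 10000
    push_neg at hex
    rw [altFind_not_found color board g _ (by simpa using hex)]
    apply fold_no_match
    intro i hi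
    rw [PySem.List.mem_pyRange_one] at hi
    exact hex i (by rw [mem_sortedRange_iff]; exact hi)
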